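-- pv_equiv track=rewrite | github.com/sunkyoyoon/2048 | main.py | compress_board
-- ===== SOURCE A (Python) =====
-- def compress_board(board):
--     new_board = [[0 for _ in range(4)] for _ in range(4)]
--     for i in range(4):
--         position = 0
--         for j in range(4):
--             if board[i][j] != 0:
--                 new_board[i][position] = board[i][j]
--                 position += 1
--     return new_board
-- ===== SOURCE B (Python) =====
-- def compress_board(board):
--     return [sorted([board[i][j] for j in range(4)], key=lambda x: x == 0)
--             for i in range(4)]
-- ===== Notes on version B (the rewrite author's own statement) =====
-- stated objective: alternative
-- what changed: Replaces A's pre-zeroed 4x4 board with scatter-writes through a moving position pointer by stably sorting each row's four tiles with the boolean key (x == 0), which moves the zeros to the end while keeping the nonzero tiles in order.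
import Mathlib
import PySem

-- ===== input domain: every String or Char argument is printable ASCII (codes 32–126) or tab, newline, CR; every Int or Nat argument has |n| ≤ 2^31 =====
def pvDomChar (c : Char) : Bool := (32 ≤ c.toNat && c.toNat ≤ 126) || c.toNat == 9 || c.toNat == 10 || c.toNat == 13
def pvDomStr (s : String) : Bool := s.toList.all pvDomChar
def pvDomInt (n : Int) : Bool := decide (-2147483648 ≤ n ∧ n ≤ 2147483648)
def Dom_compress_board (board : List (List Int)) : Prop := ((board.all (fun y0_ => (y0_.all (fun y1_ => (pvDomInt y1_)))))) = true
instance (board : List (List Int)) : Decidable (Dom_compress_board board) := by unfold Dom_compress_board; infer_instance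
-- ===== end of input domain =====

-- B replaces A's pre-zeroed 4×4 scatter-write with a stable sort of each row's first four
-- tiles under the boolean key (x == 0), which sends zeros to the end (objective: alternative).

-- ===== PORT A =====
-- range(4) gives indices 0..3 (all nonnegative), so Nat `List.range 4` and `List.getD` are
-- exact here: under Pre_ every access board[i][j] and write new_board[i][position] is in range
-- (outside Pre_ Python raises IndexError, excluded).
def compress_board (board : List (List Int)) : List (List Int) :=
  let new_board : List (List Int) := (List.range 4).map (fun _ => (List.range 4).map (fun _ => (0 : Int)))
  (List.range 4).foldl (fun nb i =>
    ((List.range 4).foldl (fun (s : List (List Int) × Nat) j =>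
      if (board.getD i []).getD j 0 ≠ 0 then
        (s.1.set i ((s.1.getD i []).set s.2 ((board.getD i []).getD j 0)), s.2 + 1)
      else s) (nb, 0)).1) new_board

-- ===== PORT B =====
-- range(4) gives indices 0..3 (nonnegative), so Nat `List.range 4` and `List.getD` are exact:
-- under Pre_ every access board[i][j] is in range (outside Pre_ Python raises IndexError,
-- excluded); sorted(…, key=lambda x: x == 0) is PySem.List.sorted with the Bool key
-- (decide (x = 0)) — Python's False < True is Bool's false < true, and both sorts are stable.
def compress_board_alt (board : List (List Int)) : List (List Int) :=
  (List.range 4).map (fun i =>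
    PySem.List.sorted ((List.range 4).map (fun j => (board.getD i []).getD j 0))
      (fun x => decide (x = 0)) false)

-- ===== PRECONDITION & SPEC =====
-- Exactly where A returns: at least 4 rows whose first four each have at least 4 entries
-- (otherwise board[i][j] raises IndexError).
def Pre_compress_board (board : List (List Int)) : Prop :=
  4 ≤ board.length ∧ ∀ row ∈ board.take 4, 4 ≤ row.length
instance (board : List (List Int)) : Decidable (Pre_compress_board board) := by
  unfold Pre_compress_board; infer_instance

def pvWitness_compress_board : List (List Int) :=
  [[2, 0, 2, 4], [0, 0, 0, 0], [4, 4, 0, 2], [0, 2, 0, 0]]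

def Spec_compress_board (board : List (List Int)) (out : List (List Int)) : Prop := out = compress_board_alt board
instance (board : List (List Int)) (out : List (List Int)) : Decidable (Spec_compress_board board out) := by unfold Spec_compress_board; infer_instance

-- ===== CLAIM (what is proved, stated in full; the proofs are below) =====
def Claim_equal_compress_board : Prop := ∀ (board : List (List Int)), Dom_compress_board board → Pre_compress_board board → Spec_compress_board board (compress_board board)

-- ===== LEMMAS AND PROOFS =====

lemma four_of_len {α : Type} (xs : List α) (h : 4 ≤ xs.length) :
    ∃ a b c d t, xs = a :: b :: c :: d :: t := by
  match xs with
  | a :: b :: c :: d :: t => exact ⟨a, b, c, d, t, rfl⟩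
  | [] | [_] | [_, _] | [_, _, _] => simp at h

-- The compacted row (nonzeros in order, zeros at the end), named for the proofs.
def padRow (r : List Int) : List Int :=
  let nz := r.filter (fun x => x ≠ 0)
  nz ++ List.replicate (4 - nz.length) (0 : Int)

-- B's stable sort on a 4-tile row is exactly the compacted row.
lemma sortRow_eq_padRow (a b c d : Int) :
    PySem.List.sorted [a, b, c, d] (fun x => decide (x = 0)) false = padRow [a, b, c, d] := by
  by_cases ha : a = 0 <;> by_cases hb : b = 0 <;> by_cases hc : c = 0 <;> by_cases hd : d = 0 <;>
    simp [PySem.List.sorted_eq_foldl_insertBy, PySem.List.insertBy, padRow, ha, hb, hc, hd,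
          show ¬ (true < false) from by decide, show (false < true) from by decide]

-- A's outer-loop body, named so the inner loop stays folded while the outer loop is unrolled.
def outerF (board : List (List Int)) : List (List Int) → Nat → List (List Int) :=
  fun nb i => ((List.range 4).foldl (fun (s : List (List Int) × Nat) j =>
      if (board.getD i []).getD j 0 ≠ 0 then
        (s.1.set i ((s.1.getD i []).set s.2 ((board.getD i []).getD j 0)), s.2 + 1)
      else s) (nb, 0)).1

lemma compress_eq_foldl (board : List (List Int)) :
    compress_board board = List.foldl (outerF board)
      [[0, 0, 0, 0], [0, 0, 0, 0], [0, 0, 0, 0], [0, 0, 0, 0]] [0, 1, 2, 3] := rfl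

-- A's inner loop over row i of the board (a row of length ≥ 4), writing into row i of nb
-- (still all zeros), produces exactly the compacted row at position i.
lemma stepF (board : List (List Int)) (i : Nat) (a b c d : Int) (t : List Int)
    (hrow : board.getD i [] = a :: b :: c :: d :: t) (nb : List (List Int))
    (hi : i < nb.length) (h0s : nb[i]? = some [0, 0, 0, 0]) :
    outerF board nb i = nb.set i (padRow [a, b, c, d]) := by
  have hgd : ∀ (x : List Int), (nb.set i x)[i]?.getD [] = x := by
    intro x
    simp [List.getElem?_set_self (by simpa using hi)]
  have hset : nb.set i ([0, 0, 0, 0] : List Int) = nb := by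
    apply List.ext_getElem?
    intro k
    by_cases hk : k = i
    · subst hk; simp [List.getElem?_set_self (by simpa using hi), h0s]
    · rw [List.getElem?_set_ne (by omega)]
  have hr : List.range 4 = [0, 1, 2, 3] := rfl
  have h0' : nb[i]?.getD ([] : List Int) = [0, 0, 0, 0] := by simp [h0s]
  unfold outerF
  simp only [hrow, hr]
  by_cases ha : a = 0 <;> by_cases hb : b = 0 <;> by_cases hc : c = 0 <;> by_cases hd : d = 0 <;>
    simp [padRow, ha, hb, hc, hd, h0', hgd, hset, List.set_set, List.getD]

-- ===== VERDICT (by name: the statement is the Claim_ definition above) =====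
theorem compress_board_spec : Claim_equal_compress_board := by
  intro board _ hpre
  obtain ⟨hlen, hrows⟩ := hpre
  obtain ⟨r0, r1, r2, r3, rest, rfl⟩ := four_of_len board hlen
  obtain ⟨a0, b0, c0, d0, t0, rfl⟩ := four_of_len r0 (hrows _ (by simp))
  obtain ⟨a1, b1, c1, d1, t1, rfl⟩ := four_of_len r1 (hrows _ (by simp))
  obtain ⟨a2, b2, c2, d2, t2, rfl⟩ := four_of_len r2 (hrows _ (by simp))
  obtain ⟨a3, b3, c3, d3, t3, rfl⟩ := four_of_len r3 (hrows _ (by simp))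
  show compress_board _ = compress_board_alt _
  rw [compress_eq_foldl]
  simp only [List.foldl_cons, List.foldl_nil]
  rw [stepF _ 0 a0 b0 c0 d0 t0 (by simp) _ (by simp) (by simp)]
  rw [stepF _ 1 a1 b1 c1 d1 t1 (by simp) _ (by simp) (by simp)]
  rw [stepF _ 2 a2 b2 c2 d2 t2 (by simp) _ (by simp) (by simp)]
  rw [stepF _ 3 a3 b3 c3 d3 t3 (by simp) _ (by simp) (by simp)]
  simp [compress_board_alt, sortRow_eq_padRow, List.set, show List.range 4 = [0, 1, 2, 3] from rfl]
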